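-- pv_equiv track=rewrite | github.com/dalmafekete/ECOPY_23241 | src/weekly/weekly_test_1.py | every_element_is_odd
-- ===== SOURCE A (Python) =====
-- def every_element_is_odd(input_list):
--     odd_count = 0
--     for num in input_list:
--         if num % 2 == 1:
--             odd_count += 1
--     if odd_count == len(input_list):
--          return True
--     else:
--         return False
-- ===== SOURCE B (Python) =====
-- def every_element_is_odd(input_list):
--     return all(num % 2 == 1 for num in input_list)
-- ===== Notes on version B (the rewrite author's own statement) =====
-- stated objective: idiomatic
-- what changed: Replaces the odd-count accumulator and final count==len comparison with a short-circuiting all(...) over the same oddness predicate.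
import Mathlib
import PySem

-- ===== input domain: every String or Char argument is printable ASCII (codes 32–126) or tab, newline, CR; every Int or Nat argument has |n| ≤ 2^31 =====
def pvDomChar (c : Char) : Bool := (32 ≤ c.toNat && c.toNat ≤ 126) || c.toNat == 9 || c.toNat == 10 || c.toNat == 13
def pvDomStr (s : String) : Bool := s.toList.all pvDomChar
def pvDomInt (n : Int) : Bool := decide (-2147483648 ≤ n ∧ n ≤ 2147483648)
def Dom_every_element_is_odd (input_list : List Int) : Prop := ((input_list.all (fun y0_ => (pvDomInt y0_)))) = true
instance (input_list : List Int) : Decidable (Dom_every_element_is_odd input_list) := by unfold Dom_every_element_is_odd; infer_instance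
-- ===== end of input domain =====

-- B replaces A's odd-count accumulator and count==len comparison with a short-circuiting all(...) (idiomatic).

-- ===== PORT A =====
def every_element_is_odd (input_list : List Int) : Bool :=
  let odd_count := input_list.foldl
    (fun odd_count num => if PySem.Int.mod num 2 = 1 then odd_count + 1 else odd_count) (0 : Int)
  if odd_count = (input_list.length : Int) then true else false

-- ===== PORT B =====
def every_element_is_odd_alt (input_list : List Int) : Bool :=
  input_list.all (fun num => PySem.Int.mod num 2 == 1)

-- ===== PRECONDITION & SPEC =====
def Spec_every_element_is_odd (input_list : List Int) (out : Bool) : Prop := out = every_element_is_odd_alt input_list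
instance (input_list : List Int) (out : Bool) : Decidable (Spec_every_element_is_odd input_list out) := by unfold Spec_every_element_is_odd; infer_instance

-- ===== CLAIM (what is proved, stated in full; the proofs are below) =====
def Claim_equal_every_element_is_odd : Prop := ∀ (input_list : List Int), Dom_every_element_is_odd input_list → Spec_every_element_is_odd input_list (every_element_is_odd input_list)

-- ===== LEMMAS AND PROOFS =====

theorem pv_count_lemma (l : List Int) (c : Int) :
    l.foldl (fun odd_count num => if PySem.Int.mod num 2 = 1 then odd_count + 1 else odd_count) c
      = c + ((l.filter (fun num => PySem.Int.mod num 2 == 1)).length : Int) := by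
  induction l generalizing c with
  | nil => simp
  | cons x xs ih =>
    simp only [List.foldl_cons, List.filter_cons, ih]
    by_cases h : PySem.Int.mod x 2 = 1
    · rw [if_pos h, if_pos (show (PySem.Int.mod x 2 == 1) = true from beq_iff_eq.mpr h)]
      rw [List.length_cons]
      push_cast
      ring
    · rw [if_neg h, if_neg (show ¬ (PySem.Int.mod x 2 == 1) = true from by simpa using h)]

theorem pv_eq (l : List Int) : every_element_is_odd l = every_element_is_odd_alt l := by
  simp only [every_element_is_odd, every_element_is_odd_alt, pv_count_lemma, zero_add]
  by_cases h : (l.filter (fun num => PySem.Int.mod num 2 == 1)).length = l.length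
  · rw [if_pos (by exact_mod_cast h)]
    exact (List.all_eq_true.mpr (List.length_filter_eq_length_iff.mp h)).symm
  · rw [if_neg (show ¬ ((l.filter (fun num => PySem.Int.mod num 2 == 1)).length : Int) = (l.length : Int) from by exact_mod_cast h)]
    cases hall : l.all (fun num => PySem.Int.mod num 2 == 1) with
    | false => rfl
    | true => exact absurd (List.length_filter_eq_length_iff.mpr (List.all_eq_true.mp hall)) h

-- ===== VERDICT (by name: the statement is the Claim_ definition above) =====
theorem every_element_is_odd_spec : Claim_equal_every_element_is_odd := by
  intro l _
  exact pv_eq l
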